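-- pv_equiv track=rewrite | github.com/axelsvegerud/advent-of-code | AoC24/Days/day08.py | find_antinodes_part2
-- ===== SOURCE A (Python) =====
-- def find_antinodes_part2(grid, antennas):
--     antinodes = set()
--
--     for positions in antennas.values():
--         n = len(positions)
--         for i in range(n):
--             for j in range(i + 1, n):
--                 x1, y1 = positions[i]
--                 x2, y2 = positions[j]
--
--                 dx, dy = x2 - x1, y2 - y1
--
--                 antinode1 = (x1 - dx, y1 - dy)
--                 antinode2 = (x2 + dx, y2 + dy)
--
--                 if in_bounds(antinode1, grid):
--                     antinodes.add(antinode1)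
--                 if in_bounds(antinode2, grid):
--                     antinodes.add(antinode2)
--
--                 p1 = (x1 + dx, y1 + dy)
--                 while in_bounds(p1, grid):
--                     antinodes.add(p1)
--                     p1 = (p1[0] + dx, p1[1] + dy)
--
--                 p2 = (x2 - dx, y2 - dy)
--                 while in_bounds(p2, grid):
--                     antinodes.add(p2)
--                     p2 = (p2[0] - dx, p2[1] - dy)
--
--     return antinodes
--
-- def in_bounds(position, grid):
--     x, y = position
--     return 0 <= y < len(grid) and 0 <= x < len(grid[0])
-- ===== SOURCE B (Python) =====
-- def axis_range(c, d, size):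
--     # integer t with 0 <= c + t*d <= size-1 (d != 0); ceil via -((-a)//d)
--     if d > 0:
--         return -(c // d), (size - 1 - c) // d
--     return -((size - 1 - c) // -d), c // -d
--
--
-- def line_range(x, y, dx, dy, w, h):
--     # the contiguous range of step multiples t keeping (x + t*dx, y + t*dy) on the w x h grid
--     if dx == 0:
--         if not 0 <= x < w:
--             return 0, -1
--         return axis_range(y, dy, h)
--     if dy == 0:
--         if not 0 <= y < h:
--             return 0, -1
--         return axis_range(x, dx, w)
--     xlo, xhi = axis_range(x, dx, w)
--     ylo, yhi = axis_range(y, dy, h)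
--     return max(xlo, ylo), min(xhi, yhi)
--
--
-- def find_antinodes_part2(grid, antennas):
--     antinodes = set()
--     if not grid:
--         return antinodes
--     h, w = len(grid), len(grid[0])
--
--     def on_grid(x, y):
--         return 0 <= x < w and 0 <= y < h
--
--     for positions in antennas.values():
--         rest = list(positions)
--         while rest:
--             x1, y1 = rest.pop(0)
--             for x2, y2 in rest:
--                 dx, dy = x2 - x1, y2 - y1
--                 if on_grid(x1 - dx, y1 - dy):
--                     antinodes.add((x1 - dx, y1 - dy))
--                 if on_grid(x2 + dx, y2 + dy):
--                     antinodes.add((x2 + dx, y2 + dy))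
--                 # each on-grid antenna casts a ray through its partner; the ray's
--                 # in-bounds extent comes from the closed-form step range
--                 if on_grid(x2, y2):
--                     _, hi = line_range(x1, y1, dx, dy, w, h)
--                     for t in range(1, hi + 1):
--                         antinodes.add((x1 + t * dx, y1 + t * dy))
--                 if on_grid(x1, y1):
--                     lo, _ = line_range(x1, y1, dx, dy, w, h)
--                     for t in range(0, lo - 1, -1):
--                         antinodes.add((x1 + t * dx, y1 + t * dy))
--     return antinodes
-- ===== Notes on version B (the rewrite author's own statement) =====
-- stated objective: alternative
-- what changed: Per antenna pair, B computes the contiguous in-bounds range of step multiples t in closed form (ceil/floor division, intersecting the x- and y-axis constraints) and emits each on-grid antenna's outward ray with one bounded for-loop over that range, instead of A's step-by-step while-walks that test bounds at every step; the pair iteration is a pop/iterate decomposition instead of double index ranges. Pre_ excludes only inputs on which A diverges (an antenna group listing the same in-bounds position twice makes A's while-loop step by (0,0) forever); B raises ZeroDivisionError there.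
import Mathlib
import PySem

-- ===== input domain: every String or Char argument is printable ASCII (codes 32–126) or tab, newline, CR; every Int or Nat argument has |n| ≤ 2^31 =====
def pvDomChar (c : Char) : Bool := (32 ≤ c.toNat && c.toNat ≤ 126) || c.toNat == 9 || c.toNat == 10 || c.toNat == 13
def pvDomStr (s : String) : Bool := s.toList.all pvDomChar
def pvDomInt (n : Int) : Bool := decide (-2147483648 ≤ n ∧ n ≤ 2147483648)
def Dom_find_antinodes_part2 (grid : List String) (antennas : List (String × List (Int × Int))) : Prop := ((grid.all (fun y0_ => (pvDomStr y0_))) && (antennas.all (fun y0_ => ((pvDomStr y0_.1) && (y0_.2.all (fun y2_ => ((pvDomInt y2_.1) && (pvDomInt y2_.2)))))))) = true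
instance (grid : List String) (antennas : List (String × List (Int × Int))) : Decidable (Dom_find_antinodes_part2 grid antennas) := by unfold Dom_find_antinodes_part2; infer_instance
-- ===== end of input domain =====

-- B derives, per antenna pair, the contiguous in-bounds range of step multiples in closed form
-- (ceil/floor division) and emits each on-grid antenna's outward ray with one bounded loop,
-- instead of A's step-by-step while-walks that test bounds at every step.

-- ===== PORT A =====

-- in_bounds(position, grid); the 'and' short-circuits, so grid[0] is only read when 0 ≤ y < len(grid)
def pvInBounds (pos : Int × Int) (grid : List String) : Bool :=
  decide (0 ≤ pos.2) && decide (pos.2 < PySem.List.len grid) &&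
    (match grid with
     | [] => false                    -- unreachable when the previous test held
     | g0 :: _ => decide (0 ≤ pos.1) && decide (pos.1 < PySem.Str.len g0))

-- 'while in_bounds(p, grid): antinodes.add(p); p += (dx, dy)' as fuel recursion; under
-- Pre_ the walk leaves the grid after at most height + width steps, so pvFuel suffices.
def pvWalkA (grid : List String) (dx dy : Int) : Nat → Int × Int → List (Int × Int) → List (Int × Int)
  | 0, _, s => s
  | fuel + 1, p, s =>
      if pvInBounds p grid then pvWalkA grid dx dy fuel (p.1 + dx, p.2 + dy) (PySem.Set.add s p)
      else s

def pvFuel (grid : List String) : Nat :=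
  grid.length + (match grid with | [] => 0 | g0 :: _ => (PySem.Str.len g0).toNat) + 2

-- the body of A's inner pair loop
def pvPairA (grid : List String) (x1 y1 x2 y2 : Int) (s : List (Int × Int)) : List (Int × Int) :=
  let dx := x2 - x1
  let dy := y2 - y1
  let a1 := (x1 - dx, y1 - dy)
  let a2 := (x2 + dx, y2 + dy)
  let s := if pvInBounds a1 grid then PySem.Set.add s a1 else s
  let s := if pvInBounds a2 grid then PySem.Set.add s a2 else s
  let s := pvWalkA grid dx dy (pvFuel grid) (x1 + dx, y1 + dy) s
  pvWalkA grid (-dx) (-dy) (pvFuel grid) (x2 - dx, y2 - dy) s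

def find_antinodes_part2 (grid : List String) (antennas : List (String × List (Int × Int))) : List (Int × Int) :=
  antennas.foldl (fun s kv =>
    let positions := kv.2
    let n := PySem.List.len positions
    (PySem.List.pyRange 0 n 1).foldl (fun s i =>
      (PySem.List.pyRange (i + 1) n 1).foldl (fun s j =>
        let p1 := PySem.List.pyGetD positions i (0, 0)
        let p2 := PySem.List.pyGetD positions j (0, 0)
        pvPairA grid p1.1 p1.2 p2.1 p2.2 s) s) s) []

-- ===== PORT B =====

-- 0 <= x < w and 0 <= y < h
def pvInR (w h x y : Int) : Bool :=
  decide (0 ≤ x) && decide (x < w) && decide (0 ≤ y) && decide (y < h)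

-- axis_range(c, d, size): integer t with 0 <= c + t*d <= size-1 (d != 0)
def pvAxisB (c d size : Int) : Int × Int :=
  if 0 < d then (-(PySem.Int.floordiv c d), PySem.Int.floordiv (size - 1 - c) d)
  else (-(PySem.Int.floordiv (size - 1 - c) (-d)), PySem.Int.floordiv c (-d))

-- line_range(x, y, dx, dy, w, h)
def pvLineRange (x y dx dy w h : Int) : Int × Int :=
  if dx = 0 then
    if 0 ≤ x ∧ x < w then pvAxisB y dy h else (0, -1)
  else if dy = 0 then
    if 0 ≤ y ∧ y < h then pvAxisB x dx w else (0, -1)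
  else
    (max (pvAxisB x dx w).1 (pvAxisB y dy h).1, min (pvAxisB x dx w).2 (pvAxisB y dy h).2)

-- the body of B's inner pair loop
def pvPairB (w h x1 y1 x2 y2 : Int) (s : List (Int × Int)) : List (Int × Int) :=
  let dx := x2 - x1
  let dy := y2 - y1
  let s := if pvInR w h (x1 - dx) (y1 - dy) then PySem.Set.add s (x1 - dx, y1 - dy) else s
  let s := if pvInR w h (x2 + dx) (y2 + dy) then PySem.Set.add s (x2 + dx, y2 + dy) else s
  let s := if pvInR w h x2 y2 then
      (PySem.List.pyRange 1 ((pvLineRange x1 y1 dx dy w h).2 + 1) 1).foldl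
        (fun s t => PySem.Set.add s (x1 + t * dx, y1 + t * dy)) s
    else s
  if pvInR w h x1 y1 then
      (PySem.List.pyRange 0 ((pvLineRange x1 y1 dx dy w h).1 - 1) (-1)).foldl
        (fun s t => PySem.Set.add s (x1 + t * dx, y1 + t * dy)) s
  else s

-- 'rest = list(positions); while rest: p = rest.pop(0); for q in rest: …'
def pvPairsB (w h : Int) : List (Int × Int) → List (Int × Int) → List (Int × Int)
  | [], s => s
  | p :: rest, s =>
      pvPairsB w h rest (rest.foldl (fun s q => pvPairB w h p.1 p.2 q.1 q.2 s) s)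

def find_antinodes_part2_alt (grid : List String) (antennas : List (String × List (Int × Int))) : List (Int × Int) :=
  match grid with
  | [] => []
  | g0 :: gs =>
      antennas.foldl (fun s kv => pvPairsB (PySem.Str.len g0) (PySem.List.len (g0 :: gs)) kv.2 s) []

-- ===== PRECONDITION & SPEC =====

-- Pre_ excludes only inputs on which A DIVERGES: an antenna listing the same in-bounds
-- position twice makes A's while-loop step by (0, 0) forever. A returns on everything else.
def Pre_find_antinodes_part2 (grid : List String) (antennas : List (String × List (Int × Int))) : Prop :=
  ∀ kv ∈ antennas, ∀ p ∈ kv.2, 1 < kv.2.count p → pvInBounds p grid = false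
instance (grid : List String) (antennas : List (String × List (Int × Int))) : Decidable (Pre_find_antinodes_part2 grid antennas) := by unfold Pre_find_antinodes_part2; infer_instance

def pvWitness_find_antinodes_part2 : List String × (List (String × List (Int × Int))) :=
  (["ab", "cd"], [("a", [(0, 0), (1, 1)])])

def Spec_find_antinodes_part2 (grid : List String) (antennas : List (String × List (Int × Int))) (out : List (Int × Int)) : Prop := out = find_antinodes_part2_alt grid antennas
instance (grid : List String) (antennas : List (String × List (Int × Int))) (out : List (Int × Int)) : Decidable (Spec_find_antinodes_part2 grid antennas out) := by unfold Spec_find_antinodes_part2; infer_instance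

-- ===== CLAIM =====

def Claim_equal_find_antinodes_part2 : Prop := ∀ (grid : List String) (antennas : List (String × List (Int × Int))), Dom_find_antinodes_part2 grid antennas → Pre_find_antinodes_part2 grid antennas → Spec_find_antinodes_part2 grid antennas (find_antinodes_part2 grid antennas)

-- ===== LEMMAS AND PROOFS =====

theorem pv_witness_ok :
    Dom_find_antinodes_part2 pvWitness_find_antinodes_part2.1 pvWitness_find_antinodes_part2.2 ∧
    Pre_find_antinodes_part2 pvWitness_find_antinodes_part2.1 pvWitness_find_antinodes_part2.2 := by
  constructor <;> decide

-- A's per-pair result, described through the canonical in-bounds interval [lo, hi] of step multiples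
def pvEmitA (x1 y1 dx dy lo hi : Int) (s : List (Int × Int)) : List (Int × Int) :=
  let s := if lo ≤ -1 ∧ -1 ≤ hi then PySem.Set.add s (x1 - dx, y1 - dy) else s
  let s := if lo ≤ 2 ∧ 2 ≤ hi then PySem.Set.add s (x1 + 2 * dx, y1 + 2 * dy) else s
  let s := if lo ≤ 1 ∧ 1 ≤ hi then
      (PySem.List.pyRange 1 (hi + 1) 1).foldl (fun s t => PySem.Set.add s (x1 + t * dx, y1 + t * dy)) s
    else s
  if lo ≤ 0 ∧ 0 ≤ hi then
      (PySem.List.pyRange 0 (1 - lo) 1).foldl (fun s u => PySem.Set.add s (x1 - u * dx, y1 - u * dy)) s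
    else s

theorem walk_stop (grid : List String) (dx dy : Int) (fuel : Nat) (p : Int × Int)
    (s : List (Int × Int)) (h : pvInBounds p grid = false) :
    pvWalkA grid dx dy fuel p s = s := by
  cases fuel <;> simp [pvWalkA, h]

theorem walk_run (grid : List String) (dx dy : Int) (X Y : Int → Int)
    (hX : ∀ t, X (t + 1) = X t + dx) (hY : ∀ t, Y (t + 1) = Y t + dy)
    (lo hi : Int)
    (hchar : ∀ t, pvInBounds (X t, Y t) grid = decide (lo ≤ t ∧ t ≤ hi)) :
    ∀ (fuel : Nat) (t0 : Int) (s : List (Int × Int)), lo ≤ t0 → t0 ≤ hi → hi < t0 + fuel →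
      pvWalkA grid dx dy fuel (X t0, Y t0) s
        = (PySem.List.pyRange t0 (hi + 1) 1).foldl (fun s t => PySem.Set.add s (X t, Y t)) s := by
  intro fuel
  induction fuel with
  | zero => intro t0 s h1 h2 h3; exfalso; omega
  | succ n ih =>
    intro t0 s h1 h2 h3
    have hin : pvInBounds (X t0, Y t0) grid = true := by
      rw [hchar]; simp only [decide_eq_true_eq]; exact ⟨h1, h2⟩
    rw [pvWalkA, if_pos hin, PySem.List.pyRange_one_cons (by omega : t0 < hi + 1),
      List.foldl_cons, ← hX t0, ← hY t0]
    by_cases hlast : t0 = hi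
    · subst hlast
      rw [walk_stop _ _ _ _ _ _ (by rw [hchar]; simp only [decide_eq_false_iff_not]; omega),
        PySem.List.pyRange_one_eq_nil (le_refl _), List.foldl_nil]
    · exact ih (t0 + 1) _ (by omega) (by omega) (by omega)

theorem inb_cons (g0 : String) (gs : List String) (x y : Int) :
    pvInBounds (x, y) (g0 :: gs) =
      decide ((0 ≤ x ∧ x < PySem.Str.len g0) ∧ (0 ≤ y ∧ y < PySem.List.len (g0 :: gs))) := by
  by_cases h1 : (0 ≤ x) <;> by_cases h2 : x < PySem.Str.len g0 <;>
    by_cases h3 : (0 ≤ y) <;> by_cases h4 : y < PySem.List.len (g0 :: gs) <;>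
    simp [pvInBounds, h1, h3, Bool.and_comm]

theorem inb_nil (p : Int × Int) : pvInBounds p [] = false := by
  simp [pvInBounds]

theorem inR_eq (g0 : String) (gs : List String) (x y : Int) :
    pvInR (PySem.Str.len g0) (PySem.List.len (g0 :: gs)) x y = pvInBounds (x, y) (g0 :: gs) := by
  rw [inb_cons]
  by_cases h1 : (0 ≤ x) <;> by_cases h2 : x < PySem.Str.len g0 <;>
    by_cases h3 : (0 ≤ y) <;> by_cases h4 : y < PySem.List.len (g0 :: gs) <;>
    simp [pvInR, h1, h3]

theorem interval_bound (c d lo1 hi1 size : Int) (hd : d ≠ 0)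
    (h1 : 0 ≤ c + lo1 * d ∧ c + lo1 * d < size)
    (h2 : 0 ≤ c + hi1 * d ∧ c + hi1 * d < size)
    (hle : lo1 ≤ hi1) : hi1 - lo1 ≤ size - 1 := by
  rcases lt_or_gt_of_ne hd with h | h
  · nlinarith [mul_nonneg (sub_nonneg.mpr hle) (by omega : (0:Int) ≤ -d - 1 + 1),
      mul_nonneg (sub_nonneg.mpr hle) (by omega : (0:Int) ≤ -d - 1)]
  · nlinarith [mul_nonneg (sub_nonneg.mpr hle) (by omega : (0:Int) ≤ d - 1)]

theorem axis_char (c d size t : Int) (hd : d ≠ 0) :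
    (0 ≤ c + t * d ∧ c + t * d < size) ↔
      ((pvAxisB c d size).1 ≤ t ∧ t ≤ (pvAxisB c d size).2) := by
  rcases lt_or_gt_of_ne hd with h | h
  · have hpos : (0 : Int) < -d := by omega
    simp only [pvAxisB, if_neg (by omega : ¬ 0 < d)]
    have e1 : (-(PySem.Int.floordiv (size - 1 - c) (-d)) ≤ t) ↔ c + t * d < size := by
      rw [neg_le, PySem.Int.le_floordiv_iff_mul_le hpos]
      constructor <;> intro hh <;> nlinarith
    have e2 : (t ≤ PySem.Int.floordiv c (-d)) ↔ 0 ≤ c + t * d := by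
      rw [PySem.Int.le_floordiv_iff_mul_le hpos]
      constructor <;> intro hh <;> nlinarith
    rw [e1, e2]; tauto
  · simp only [pvAxisB, if_pos h]
    have e1 : (-(PySem.Int.floordiv c d) ≤ t) ↔ 0 ≤ c + t * d := by
      rw [neg_le, PySem.Int.le_floordiv_iff_mul_le h]
      constructor <;> intro hh <;> nlinarith
    have e2 : (t ≤ PySem.Int.floordiv (size - 1 - c) d) ↔ c + t * d < size := by
      rw [PySem.Int.le_floordiv_iff_mul_le h]
      constructor <;> intro hh <;> nlinarith
    rw [e1, e2]

theorem pairA_eq_emit (g0 : String) (gs : List String) (x1 y1 dx dy lo hi : Int)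
    (s : List (Int × Int)) (hnz : ¬ (dx = 0 ∧ dy = 0))
    (hchar : ∀ t : Int, pvInBounds (x1 + t * dx, y1 + t * dy) (g0 :: gs)
      = decide (lo ≤ t ∧ t ≤ hi)) :
    pvPairA (g0 :: gs) x1 y1 (x1 + dx) (y1 + dy) s = pvEmitA x1 y1 dx dy lo hi s := by
  have hdx : x1 + dx - x1 = dx := by ring
  have hdy : y1 + dy - y1 = dy := by ring
  have r2 : x1 + dx + dx = x1 + 2 * dx := by ring
  have r2y : y1 + dy + dy = y1 + 2 * dy := by ring
  have rb : x1 + dx - dx = x1 := by ring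
  have rby : y1 + dy - dy = y1 := by ring
  have hchar' : ∀ u : Int, pvInBounds (x1 - u * dx, y1 - u * dy) (g0 :: gs)
      = decide (-hi ≤ u ∧ u ≤ -lo) := by
    intro u
    have hc := hchar (-u)
    rw [show x1 + -u * dx = x1 - u * dx by ring, show y1 + -u * dy = y1 - u * dy by ring] at hc
    rw [hc]; exact decide_eq_decide.mpr (by omega)
  have c1 := hchar (-1)
  rw [show x1 + -1 * dx = x1 - dx by ring, show y1 + -1 * dy = y1 - dy by ring] at c1
  have c2 := hchar 2
  -- a bound on the interval, for the walk fuel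
  have bound : ∀ t1 t2 : Int, lo ≤ t1 → t1 ≤ hi → lo ≤ t2 → t2 ≤ hi → t1 ≤ t2 →
      t2 - t1 ≤ (gs.length : Int) + (g0.length : Int) := by
    intro t1 t2 ha hb hc hd hle
    have i1 : pvInBounds (x1 + t1 * dx, y1 + t1 * dy) (g0 :: gs) = true := by
      rw [hchar]; simp only [decide_eq_true_eq]; exact ⟨ha, hb⟩
    have i2 : pvInBounds (x1 + t2 * dx, y1 + t2 * dy) (g0 :: gs) = true := by
      rw [hchar]; simp only [decide_eq_true_eq]; exact ⟨hc, hd⟩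
    rw [inb_cons, decide_eq_true_eq] at i1 i2
    simp only [PySem.Str.len_eq, PySem.List.len_eq, List.length_cons] at i1 i2
    rcases not_and_or.mp hnz with hd0 | hd0
    · have := interval_bound x1 dx t1 t2 (g0.length : Int) hd0 i1.1 i2.1 hle
      omega
    · have := interval_bound y1 dy t1 t2 ((gs.length : Int) + 1) hd0
        (by push_cast at i1 ⊢; omega) (by push_cast at i2 ⊢; omega) hle
      omega
  have hF : (pvFuel (g0 :: gs) : Int) = (gs.length : Int) + (g0.length : Int) + 3 := by
    simp [pvFuel, PySem.Str.len_eq]; ring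
  simp only [pvPairA, hdx, hdy, r2, r2y, rb, rby, c1, c2]
  simp only [pvEmitA, decide_eq_true_eq]
  by_cases hf : lo ≤ 1 ∧ 1 ≤ hi
  · have W := walk_run (g0 :: gs) dx dy (fun t => x1 + t * dx) (fun t => y1 + t * dy)
      (fun t => by ring) (fun t => by ring) lo hi hchar (pvFuel (g0 :: gs)) 1
    rw [show ((x1 + dx, y1 + dy) : Int × Int) = (x1 + 1 * dx, y1 + 1 * dy) by
        simp only [Prod.mk.injEq]; constructor <;> ring]
    rw [W _ hf.1 hf.2 (by have := bound 1 hi hf.1 hf.2 (by omega) (le_refl _) hf.2; omega),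
      if_pos hf]
    by_cases hbk : lo ≤ 0 ∧ 0 ≤ hi
    · have W2 := walk_run (g0 :: gs) (-dx) (-dy) (fun u => x1 - u * dx) (fun u => y1 - u * dy)
        (fun u => by ring) (fun u => by ring) (-hi) (-lo) hchar' (pvFuel (g0 :: gs)) 0
      rw [show ((x1, y1) : Int × Int) = (x1 - 0 * dx, y1 - 0 * dy) by
          simp only [Prod.mk.injEq]; constructor <;> ring]
      rw [W2 _ (by omega) (by omega)
          (by have := bound lo 0 (le_refl _) (by omega) (by omega) (by omega) (by omega); omega),
        if_pos hbk, show -lo + 1 = 1 - lo by ring]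
    · have s2 : pvInBounds (x1, y1) (g0 :: gs) = false := by
        have hc := hchar' 0
        rw [show x1 - 0 * dx = x1 by ring, show y1 - 0 * dy = y1 by ring] at hc
        rw [hc]; simp only [decide_eq_false_iff_not]; omega
      rw [walk_stop (g0 :: gs) (-dx) (-dy) (pvFuel (g0 :: gs)) (x1, y1) _ s2, if_neg hbk]
  · have s1 : pvInBounds (x1 + dx, y1 + dy) (g0 :: gs) = false := by
      have hc := hchar 1
      rw [show x1 + 1 * dx = x1 + dx by ring, show y1 + 1 * dy = y1 + dy by ring] at hc
      rw [hc]; simp only [decide_eq_false_iff_not]; omega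
    rw [walk_stop (g0 :: gs) dx dy (pvFuel (g0 :: gs)) (x1 + dx, y1 + dy) _ s1, if_neg hf]
    by_cases hbk : lo ≤ 0 ∧ 0 ≤ hi
    · have W2 := walk_run (g0 :: gs) (-dx) (-dy) (fun u => x1 - u * dx) (fun u => y1 - u * dy)
        (fun u => by ring) (fun u => by ring) (-hi) (-lo) hchar' (pvFuel (g0 :: gs)) 0
      rw [show ((x1, y1) : Int × Int) = (x1 - 0 * dx, y1 - 0 * dy) by
          simp only [Prod.mk.injEq]; constructor <;> ring]
      rw [W2 _ (by omega) (by omega)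
          (by have := bound lo 0 (le_refl _) (by omega) (by omega) (by omega) (by omega); omega),
        if_pos hbk, show -lo + 1 = 1 - lo by ring]
    · have s2 : pvInBounds (x1, y1) (g0 :: gs) = false := by
        have hc := hchar' 0
        rw [show x1 - 0 * dx = x1 by ring, show y1 - 0 * dy = y1 by ring] at hc
        rw [hc]; simp only [decide_eq_false_iff_not]; omega
      rw [walk_stop (g0 :: gs) (-dx) (-dy) (pvFuel (g0 :: gs)) (x1, y1) _ s2, if_neg hbk]

-- B's descending backward ray equals pvEmitA's ascending-count form
theorem down_fold (x1 y1 dx dy lo : Int) (s : List (Int × Int)) :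
    (PySem.List.pyRange 0 (lo - 1) (-1)).foldl
        (fun s t => PySem.Set.add s (x1 + t * dx, y1 + t * dy)) s
      = (PySem.List.pyRange 0 (1 - lo) 1).foldl
        (fun s u => PySem.Set.add s (x1 - u * dx, y1 - u * dy)) s := by
  rw [PySem.List.pyRange_neg_one, PySem.List.pyRange_one, List.foldl_map, List.foldl_map,
    show (0 - (lo - 1)) = 1 - lo by ring, show (1 - lo - 0 : Int) = 1 - lo by ring]
  refine PySem.List.foldl_congr_mem _ _ _ _ ?_
  intro acc k _
  have e1 : x1 + (0 - (k : Int)) * dx = x1 - (0 + (k : Int)) * dx := by ring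
  have e2 : y1 + (0 - (k : Int)) * dy = y1 - (0 + (k : Int)) * dy := by ring
  rw [e1, e2]

theorem pairAB (g0 : String) (gs : List String) (x1 y1 x2 y2 : Int) (s : List (Int × Int))
    (hok : x1 = x2 ∧ y1 = y2 → pvInBounds (x1, y1) (g0 :: gs) = false) :
    pvPairA (g0 :: gs) x1 y1 x2 y2 s
      = pvPairB (PySem.Str.len g0) (PySem.List.len (g0 :: gs)) x1 y1 x2 y2 s := by
  obtain ⟨dx, rfl⟩ : ∃ d, x2 = x1 + d := ⟨x2 - x1, by ring⟩
  obtain ⟨dy, rfl⟩ : ∃ d, y2 = y1 + d := ⟨y2 - y1, by ring⟩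
  have hdx : x1 + dx - x1 = dx := by ring
  have hdy : y1 + dy - y1 = dy := by ring
  by_cases hz : dx = 0 ∧ dy = 0
  · obtain ⟨rfl, rfl⟩ := hz
    have hib : pvInBounds (x1, y1) (g0 :: gs) = false := hok ⟨by ring, by ring⟩
    have hib' : pvInR (PySem.Str.len g0) (PySem.List.len (g0 :: gs)) x1 y1 = false := by
      rw [inR_eq]; exact hib
    simp only [pvPairA, pvPairB, add_zero, sub_self, sub_zero, neg_zero, hib, hib',
      Bool.false_eq_true, if_false]
    rw [walk_stop _ _ _ _ _ _ hib, walk_stop _ _ _ _ _ _ hib]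
  · -- canonical interval characterization per branch, then translate both sides to pvEmitA
    have main : ∀ lo hi : Int,
        (∀ t : Int, pvInBounds (x1 + t * dx, y1 + t * dy) (g0 :: gs) = decide (lo ≤ t ∧ t ≤ hi)) →
        pvLineRange x1 y1 dx dy (PySem.Str.len g0) (PySem.List.len (g0 :: gs)) = (lo, hi) →
        pvPairA (g0 :: gs) x1 y1 (x1 + dx) (y1 + dy) s
          = pvPairB (PySem.Str.len g0) (PySem.List.len (g0 :: gs)) x1 y1 (x1 + dx) (y1 + dy) s := by
      intro lo hi hchar hlr
      rw [pairA_eq_emit g0 gs x1 y1 dx dy lo hi s hz hchar]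
      have ca : pvInR (PySem.Str.len g0) (PySem.List.len (g0 :: gs)) (x1 - dx) (y1 - dy)
          = decide (lo ≤ -1 ∧ -1 ≤ hi) := by
        rw [inR_eq]
        have hc := hchar (-1)
        rw [show x1 + -1 * dx = x1 - dx by ring, show y1 + -1 * dy = y1 - dy by ring] at hc
        exact hc
      have cb : pvInR (PySem.Str.len g0) (PySem.List.len (g0 :: gs)) (x1 + 2 * dx) (y1 + 2 * dy)
          = decide (lo ≤ 2 ∧ 2 ≤ hi) := by
        rw [inR_eq]; exact hchar 2
      have c1 : pvInR (PySem.Str.len g0) (PySem.List.len (g0 :: gs)) (x1 + dx) (y1 + dy)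
          = decide (lo ≤ 1 ∧ 1 ≤ hi) := by
        rw [inR_eq]
        have hc := hchar 1
        rw [show x1 + 1 * dx = x1 + dx by ring, show y1 + 1 * dy = y1 + dy by ring] at hc
        exact hc
      have c0 : pvInR (PySem.Str.len g0) (PySem.List.len (g0 :: gs)) x1 y1
          = decide (lo ≤ 0 ∧ 0 ≤ hi) := by
        rw [inR_eq]
        have hc := hchar 0
        rw [show x1 + 0 * dx = x1 by ring, show y1 + 0 * dy = y1 by ring] at hc
        exact hc
      simp only [pvPairB, hdx, hdy, show x1 + dx + dx = x1 + 2 * dx by ring,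
        show y1 + dy + dy = y1 + 2 * dy by ring, ca, cb, c1, c0, hlr, pvEmitA,
        decide_eq_true_eq]
      rw [down_fold]
    by_cases hdx0 : dx = 0
    · subst hdx0
      have hdy0 : dy ≠ 0 := by tauto
      by_cases hx : 0 ≤ x1 ∧ x1 < PySem.Str.len g0
      · refine main (pvAxisB y1 dy (PySem.List.len (g0 :: gs))).1
          (pvAxisB y1 dy (PySem.List.len (g0 :: gs))).2 ?_ ?_
        · intro t
          rw [show x1 + t * 0 = x1 by ring, inb_cons]
          exact decide_eq_decide.mpr (by
            rw [axis_char y1 dy (PySem.List.len (g0 :: gs)) t hdy0]; tauto)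
        · simp [pvLineRange, hx]
          intro h
          have hc : (g0.toList.length : Int) = (g0.length : Int) := by simp
          have h2 := hx.2
          rw [PySem.Str.len_eq] at h2
          omega
      · refine main 0 (-1) ?_ ?_
        · intro t
          rw [show x1 + t * 0 = x1 by ring, inb_cons]
          exact decide_eq_decide.mpr
            ⟨fun hc => absurd hc.1 hx, fun h' => absurd h' (by omega)⟩
        · simp [pvLineRange]
          intro h1 h2
          have hc : (g0.toList.length : Int) = (g0.length : Int) := by simp
          exact absurd ⟨h1, by rw [PySem.Str.len_eq]; omega⟩ hx
    · by_cases hdy0 : dy = 0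
      · subst hdy0
        by_cases hy : 0 ≤ y1 ∧ y1 < PySem.List.len (g0 :: gs)
        · refine main (pvAxisB x1 dx (PySem.Str.len g0)).1
            (pvAxisB x1 dx (PySem.Str.len g0)).2 ?_ ?_
          · intro t
            rw [show y1 + t * 0 = y1 by ring, inb_cons]
            exact decide_eq_decide.mpr (by
              rw [axis_char x1 dx (PySem.Str.len g0) t hdx0]; tauto)
          · simp [pvLineRange, hdx0, hy]
            intro h
            have h2 := hy.2
            simp [PySem.List.len_eq] at h2
            omega
        · refine main 0 (-1) ?_ ?_
          · intro t
            rw [show y1 + t * 0 = y1 by ring, inb_cons]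
            exact decide_eq_decide.mpr
              ⟨fun hc => absurd hc.2 hy, fun h' => absurd h' (by omega)⟩
          · simp [pvLineRange, hdx0]
            intro h1 h2
            exact absurd ⟨h1, by simp [PySem.List.len_eq]; omega⟩ hy
      · refine main (max (pvAxisB x1 dx (PySem.Str.len g0)).1
            (pvAxisB y1 dy (PySem.List.len (g0 :: gs))).1)
          (min (pvAxisB x1 dx (PySem.Str.len g0)).2
            (pvAxisB y1 dy (PySem.List.len (g0 :: gs))).2) ?_ ?_
        · intro t
          rw [inb_cons]
          exact decide_eq_decide.mpr (by
            rw [axis_char x1 dx (PySem.Str.len g0) t hdx0,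
              axis_char y1 dy (PySem.List.len (g0 :: gs)) t hdy0]
            omega)
        · simp [pvLineRange, hdx0, hdy0]

theorem foldl_range_getD {β : Type} (f : β → (Int × Int) → β) (ps : List (Int × Int)) :
    ∀ (k : Nat) (s : β),
    (PySem.List.pyRange (k : Int) (ps.length : Int) 1).foldl
        (fun s j => f s (PySem.List.pyGetD ps j (0, 0))) s
      = (ps.drop k).foldl f s := by
  intro k
  induction hn : ps.length - k generalizing k with
  | zero =>
    intro s
    rw [PySem.List.pyRange_one_eq_nil (by omega), List.drop_eq_nil_of_le (by omega),
      List.foldl_nil, List.foldl_nil]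
  | succ n ihn =>
    intro s
    rw [PySem.List.pyRange_one_cons (by omega : (k : Int) < (ps.length : Int)), List.foldl_cons,
      PySem.List.pyGetD_natCast, List.getD_eq_getElem _ _ (by omega), List.drop_eq_getElem_cons (by omega), List.foldl_cons,
      show ((k : Int) + 1) = (((k + 1 : Nat)) : Int) by push_cast; ring]
    exact ihn (k + 1) (by omega) _

theorem pairA_nil (x1 y1 x2 y2 : Int) (s : List (Int × Int)) :
    pvPairA [] x1 y1 x2 y2 s = s := by
  simp only [pvPairA, inb_nil, Bool.false_eq_true, if_false]
  rw [walk_stop _ _ _ _ _ _ (inb_nil _), walk_stop _ _ _ _ _ _ (inb_nil _)]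

theorem valueAB (g0 : String) (gs : List String) (ps : List (Int × Int))
    (hpre : ∀ p ∈ ps, 1 < ps.count p → pvInBounds p (g0 :: gs) = false) :
    ∀ (k : Nat) (s : List (Int × Int)),
    (PySem.List.pyRange (k : Int) (ps.length : Int) 1).foldl
      (fun s i => (PySem.List.pyRange (i + 1) (ps.length : Int) 1).foldl
        (fun s j =>
          pvPairA (g0 :: gs) (PySem.List.pyGetD ps i (0, 0)).1 (PySem.List.pyGetD ps i (0, 0)).2
            (PySem.List.pyGetD ps j (0, 0)).1 (PySem.List.pyGetD ps j (0, 0)).2 s) s) s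
      = pvPairsB (PySem.Str.len g0) (PySem.List.len (g0 :: gs)) (ps.drop k) s := by
  intro k
  induction hn : ps.length - k generalizing k with
  | zero =>
    intro s
    rw [PySem.List.pyRange_one_eq_nil (by omega), List.drop_eq_nil_of_le (by omega),
      List.foldl_nil, pvPairsB]
  | succ n ihn =>
    intro s
    rw [PySem.List.pyRange_one_cons (by omega : (k : Int) < (ps.length : Int)), List.foldl_cons,
      PySem.List.pyGetD_natCast, List.getD_eq_getElem _ _ (by omega : k < ps.length),
      List.drop_eq_getElem_cons (by omega : k < ps.length)]
    simp only [pvPairsB]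
    have hinner :
        (PySem.List.pyRange ((k : Int) + 1) (ps.length : Int) 1).foldl
          (fun s j => pvPairA (g0 :: gs) ps[k].1 ps[k].2
            (PySem.List.pyGetD ps j (0, 0)).1 (PySem.List.pyGetD ps j (0, 0)).2 s) s
        = (ps.drop (k + 1)).foldl
            (fun s q => pvPairB (PySem.Str.len g0) (PySem.List.len (g0 :: gs))
              ps[k].1 ps[k].2 q.1 q.2 s) s := by
      rw [show ((k : Int) + 1) = (((k + 1 : Nat)) : Int) by push_cast; ring,
        foldl_range_getD (fun s q => pvPairA (g0 :: gs) ps[k].1 ps[k].2 q.1 q.2 s) ps (k + 1) s]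
      refine PySem.List.foldl_congr_mem _ _ _ _ ?_
      intro s' q hq
      refine pairAB g0 gs ps[k].1 ps[k].2 q.1 q.2 s' ?_
      · rintro ⟨h1, h2⟩
        have hq' : ps[k] = q := Prod.ext h1 h2
        have hcnt : 1 < ps.count ps[k] := by
          have hsub : (ps.drop k).count ps[k] ≤ ps.count ps[k] :=
            (List.drop_sublist k ps).count_le _
          rw [List.drop_eq_getElem_cons (by omega : k < ps.length), List.count_cons_self] at hsub
          have hpos : 0 < (ps.drop (k + 1)).count ps[k] :=
            List.count_pos_iff.mpr (hq' ▸ hq)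
          omega
        have := hpre ps[k] (List.getElem_mem _) hcnt
        simpa using this
    rw [hinner]
    exact ihn (k + 1) (by omega) _

theorem find_antinodes_part2_spec : Claim_equal_find_antinodes_part2 := by
  intro grid antennas _hdom hpre
  unfold Spec_find_antinodes_part2
  cases grid with
  | nil =>
    simp only [find_antinodes_part2, find_antinodes_part2_alt]
    refine Eq.trans (PySem.List.foldl_congr_mem _ _ (g := fun s _ => s) _ ?_)
      (PySem.List.foldl_ignore _ _)
    intro s kv _
    refine Eq.trans (PySem.List.foldl_congr_mem _ _ (g := fun s _ => s) _ ?_)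
      (PySem.List.foldl_ignore _ _)
    intro s' i _
    refine Eq.trans (PySem.List.foldl_congr_mem _ _ (g := fun s _ => s) _ ?_)
      (PySem.List.foldl_ignore _ _)
    intro s'' j _
    exact pairA_nil _ _ _ _ _
  | cons g0 gs =>
    simp only [find_antinodes_part2, find_antinodes_part2_alt]
    refine PySem.List.foldl_congr_mem _ _ _ _ ?_
    intro s kv hkv
    have hv := valueAB g0 gs kv.2 (fun p hp hc => hpre kv hkv p hp hc) 0 s
    simp only [Nat.cast_zero, List.drop_zero] at hv
    rw [PySem.List.len_eq kv.2]
    exact hv
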